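-- pv_equiv track=rewrite | github.com/MrBrantCode/unitest_baseline | mut_generate/mist_train_taco/taco_2622/solution.py | compute_blackboard_sum
-- ===== SOURCE A (Python) =====
-- def compute_blackboard_sum(N, X, S, MOD=10**9 + 7):
--     memo = [{} for _ in range(N)]
--     S.sort(reverse=True)
--
--     def ddp(cur_N, cur_x):
--         if cur_N == N:
--             return cur_x
--         if cur_x in memo[cur_N]:
--             return memo[cur_N][cur_x]
--         ret = ddp(cur_N + 1, cur_x % S[cur_N]) + ddp(cur_N + 1, cur_x) * (N - cur_N - 1)
--         ret = ret % MOD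
--         memo[cur_N][cur_x] = ret
--         return ret
--
--     return ddp(0, X)
-- ===== SOURCE B (Python) =====
-- def compute_blackboard_sum(N, X, S, MOD=10**9 + 7):
--     # Same observable in-place mutation as the original: S is sorted descending.
--     S.sort(reverse=True)
--     # Forward pass: the set of values reachable on the blackboard at each level.
--     levels = [{X}]
--     for k in range(N):
--         cur = levels[-1]
--         levels.append(cur | {x % S[k] for x in cur})
--     # Backward pass: DP table per level; level N is the identity.
--     table = {x: x for x in levels[N]}
--     for k in range(N - 1, -1, -1):
--         table = {x: (table[x % S[k]] + table[x] * (N - k - 1)) % MOD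
--                  for x in levels[k]}
--     return table[X]
-- ===== Notes on version B (the rewrite author's own statement) =====
-- stated objective: alternative
-- what changed: Replaces the top-down memoized recursion (a nested ddp closure with a per-level memo dict) by an iterative two-pass DP: a forward pass computing the set of reachable values per level, then a backward pass filling a per-level value table; returns table[X].
import Mathlib
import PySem

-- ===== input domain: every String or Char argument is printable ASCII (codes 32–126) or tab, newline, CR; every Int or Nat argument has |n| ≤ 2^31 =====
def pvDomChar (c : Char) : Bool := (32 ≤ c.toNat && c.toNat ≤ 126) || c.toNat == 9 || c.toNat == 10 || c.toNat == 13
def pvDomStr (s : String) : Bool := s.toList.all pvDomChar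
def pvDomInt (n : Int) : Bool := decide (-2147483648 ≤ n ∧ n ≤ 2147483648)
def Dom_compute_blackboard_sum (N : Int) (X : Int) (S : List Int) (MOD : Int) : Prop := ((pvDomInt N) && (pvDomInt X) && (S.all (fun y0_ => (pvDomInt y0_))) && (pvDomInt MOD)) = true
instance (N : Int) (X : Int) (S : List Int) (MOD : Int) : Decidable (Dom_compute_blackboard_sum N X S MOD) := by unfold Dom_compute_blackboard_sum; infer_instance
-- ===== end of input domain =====

-- B replaces A's top-down memoized recursion by an iterative two-pass level DP (alternative
-- decomposition, same cost).  Both Pythons sort S in place (same side effect); the theorems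
-- are about the return value.

-- ===== PORT A =====
-- the nested 'ddp' closure: recursion over the first-N prefix of the sorted list, the mutable
-- per-level memo list threaded through as state ('N - cur_N - 1' is the length of the remaining
-- suffix 'rest'); the catch-all for a memo list shorter than the prefix never fires (the memo is
-- built with the prefix's length below)
def bbDdp (MOD : Int) : List Int → List (PySem.Dict Int Int) → Int → Int × List (PySem.Dict Int Int)
  | [], M, x => (x, M)                      -- cur_N == N: return cur_x
  | _ :: _, [], x => (x, [])
  | s :: rest, d :: M, x =>
    match d.get? x with
    | some v => (v, d :: M)                 -- cur_x in memo[cur_N]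
    | none =>
      let r1 := bbDdp MOD rest M (PySem.Int.mod x s)
      let r2 := bbDdp MOD rest r1.2 x
      let ret := PySem.Int.mod (r1.1 + r2.1 * (rest.length : Int)) MOD
      (ret, d.insert x ret :: r2.2)

def compute_blackboard_sum (N : Int) (X : Int) (S : List Int) (MOD : Int) : Int :=
  -- memo = [{} for _ in range(N)]; S.sort(reverse=True); return ddp(0, X)
  -- (only S[0:N] is ever indexed while cur_N < N, so the recursion runs over that prefix)
  let T := (PySem.List.sorted S (fun x => x) true).take N.toNat
  (bbDdp MOD T (List.replicate T.length PySem.Dict.empty) X).1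

-- ===== PORT B =====
-- cur | {x % s for x in cur}
def bbStep (cur : PySem.Set Int) (s : Int) : PySem.Set Int :=
  PySem.Set.union cur (cur.map (fun x => PySem.Int.mod x s))

def compute_blackboard_sum_alt (N : Int) (X : Int) (S : List Int) (MOD : Int) : Int :=
  let S' := PySem.List.sorted S (fun x => x) true     -- S.sort(reverse=True)
  -- forward pass: levels = [{X}]; for k in range(N): levels.append(levels[-1] | {x % S[k] for x in levels[-1]})
  let levels := (PySem.List.pyRange 0 N 1).foldl
      (fun lv k => lv ++ [bbStep (PySem.List.pyGetD lv (-1) []) (PySem.List.pyGetD S' k 0)])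
      [PySem.Set.ofList [X]]
  -- table = {x: x for x in levels[N]}
  let table0 := (PySem.List.pyGetD levels N []).foldl
                  (fun d x => d.insert x x) (PySem.Dict.empty : PySem.Dict Int Int)
  -- for k in range(N-1, -1, -1): table = {x: (table[x%S[k]] + table[x]*(N-k-1)) % MOD for x in levels[k]}
  -- (the looked-up keys are always present: each level's values and their residues lie in the next level)
  let table := (PySem.List.pyRange (N - 1) (-1) (-1)).foldl
      (fun t k =>
        (PySem.List.pyGetD levels k []).foldl
          (fun d x => d.insert x (PySem.Int.mod
              (t.getD (PySem.Int.mod x (PySem.List.pyGetD S' k 0)) 0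
               + t.getD x 0 * (N - k - 1)) MOD))
          PySem.Dict.empty)
      table0
  table.getD X 0   -- table[X]: X is in every level, so the key is always present

-- ===== PRECONDITION & SPEC =====
-- Exactly where the Python A returns normally: N ≥ 0 (else memo[0] is an IndexError), the first N
-- entries of the descending sort exist (else IndexError) and are nonzero (else ZeroDivisionError),
-- and MOD ≠ 0 when any '% MOD' is executed (i.e. when N > 0).
def Pre_compute_blackboard_sum (N : Int) (X : Int) (S : List Int) (MOD : Int) : Prop :=
  0 ≤ N ∧ N ≤ S.length ∧ (0 < N → MOD ≠ 0) ∧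
    ∀ s ∈ (PySem.List.sorted S (fun x => x) true).take N.toNat, s ≠ 0
instance (N : Int) (X : Int) (S : List Int) (MOD : Int) : Decidable (Pre_compute_blackboard_sum N X S MOD) := by unfold Pre_compute_blackboard_sum; infer_instance
def pvWitness_compute_blackboard_sum : Int × Int × List Int × Int := (2, 10, [3, 7], 1000000007)

def Spec_compute_blackboard_sum (N : Int) (X : Int) (S : List Int) (MOD : Int) (out : Int) : Prop := out = compute_blackboard_sum_alt N X S MOD
instance (N : Int) (X : Int) (S : List Int) (MOD : Int) (out : Int) : Decidable (Spec_compute_blackboard_sum N X S MOD out) := by unfold Spec_compute_blackboard_sum; infer_instance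

-- ===== CLAIM (what is proved, stated in full; the proofs are below) =====
def Claim_equal_compute_blackboard_sum : Prop := ∀ (N : Int) (X : Int) (S : List Int) (MOD : Int), Dom_compute_blackboard_sum N X S MOD → Pre_compute_blackboard_sum N X S MOD → Spec_compute_blackboard_sum N X S MOD (compute_blackboard_sum N X S MOD)

-- ===== LEMMAS AND PROOFS =====

-- the common mathematical recurrence both programs compute, by recursion on the prefix suffix
def bbF (MOD : Int) : List Int → Int → Int
  | [], x => x
  | s :: rest, x =>
    PySem.Int.mod (bbF MOD rest (PySem.Int.mod x s) + bbF MOD rest x * (rest.length : Int)) MOD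

-- ---- A side: the memo invariant ----
def bbGood (MOD : Int) : List Int → List (PySem.Dict Int Int) → Prop
  | [], _ => True
  | _ :: _, [] => False
  | s :: rest, d :: M =>
    (∀ k v, d.get? k = some v → v = bbF MOD (s :: rest) k) ∧ bbGood MOD rest M

theorem bbGood_replicate (MOD : Int) (T : List Int) :
    bbGood MOD T (List.replicate T.length PySem.Dict.empty) := by
  induction T with
  | nil => trivial
  | cons s rest ih =>
    refine ⟨fun k v h => ?_, ih⟩
    simp [PySem.Dict.get?_empty] at h

theorem bbDdp_correct (MOD : Int) (T : List Int) : ∀ (M : List (PySem.Dict Int Int)) (x : Int),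
    bbGood MOD T M →
    (bbDdp MOD T M x).1 = bbF MOD T x ∧ bbGood MOD T (bbDdp MOD T M x).2 := by
  induction T with
  | nil => intro M x _; exact ⟨rfl, trivial⟩
  | cons s rest ih =>
    intro M x hg
    cases M with
    | nil => exact absurd hg (by simp [bbGood])
    | cons d M =>
      obtain ⟨hd, hM⟩ := hg
      by_cases hmem : ∃ v, d.get? x = some v
      · obtain ⟨v, hv⟩ := hmem
        simp only [bbDdp, hv]
        exact ⟨hd x v hv, hd, hM⟩
      · have hnone : d.get? x = none := by
          cases h : d.get? x with
          | none => rfl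
          | some v => exact absurd ⟨v, h⟩ hmem
        obtain ⟨h1v, h1g⟩ := ih M (PySem.Int.mod x s) hM
        obtain ⟨h2v, h2g⟩ := ih (bbDdp MOD rest M (PySem.Int.mod x s)).2 x h1g
        simp only [bbDdp, hnone]
        refine ⟨by rw [h1v, h2v]; rfl, fun k v h => ?_, h2g⟩
        rw [PySem.Dict.get?_insert] at h
        split_ifs at h with hk
        · subst hk
          simp only [Option.some.injEq] at h
          rw [← h, h1v, h2v]; rfl
        · exact hd k v h

-- ---- B side ----

-- membership facts for one forward step
theorem mem_bbStep_self (cur : PySem.Set Int) (s x : Int) (h : x ∈ cur) : x ∈ bbStep cur s := by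
  rw [bbStep, PySem.Set.mem_union]; exact Or.inl h

theorem mod_mem_bbStep (cur : PySem.Set Int) (s x : Int) (h : x ∈ cur) :
    PySem.Int.mod x s ∈ bbStep cur s := by
  rw [bbStep, PySem.Set.mem_union]
  exact Or.inr (List.mem_map_of_mem h)

-- the forward pass, as structural recursion (what the appending loop builds)
def bbLev (c : PySem.Set Int) : List Int → List (PySem.Set Int)
  | [] => [c]
  | s :: rest => c :: bbLev (bbStep c s) rest

-- the level reached after k steps
def bbAt (c : PySem.Set Int) : List Int → Nat → PySem.Set Int
  | _, 0 => c
  | [], _ + 1 => c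
  | s :: rest, k + 1 => bbAt (bbStep c s) rest k

theorem bbFwd (S' : List Int) (N : Int) : ∀ (n : Nat) (a : Int) (lv : List (PySem.Set Int))
    (c : PySem.Set Int), a + n = N → 0 ≤ a → N ≤ (S'.length : Int) →
    (PySem.List.pyRange a N 1).foldl
        (fun lv k => lv ++ [bbStep (PySem.List.pyGetD lv (-1) []) (PySem.List.pyGetD S' k 0)])
        (lv ++ [c])
      = lv ++ bbLev c ((S'.drop a.toNat).take n) := by
  intro n
  induction n with
  | zero =>
    intro a lv c ha ha0 hlen
    rw [PySem.List.pyRange_one_eq_nil (by omega)]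
    simp [bbLev]
  | succ n ih =>
    intro a lv c ha ha0 hlen
    have haN : a < N := by omega
    have haL : a.toNat < S'.length := by omega
    rw [PySem.List.pyRange_one_cons haN, List.foldl_cons,
        PySem.List.pyGetD_neg_one_append_singleton,
        PySem.List.pyGetD_eq_getElem _ _ ha0 (by omega)]
    rw [ih (a + 1) (lv ++ [c]) (bbStep c S'[a.toNat]) (by omega) (by omega) hlen]
    have hdrop : S'.drop a.toNat = S'[a.toNat] :: S'.drop (a.toNat + 1) :=
      List.drop_eq_getElem_cons haL
    have h1 : (a + 1).toNat = a.toNat + 1 := by omega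
    rw [h1, hdrop, List.take_succ_cons]
    simp [bbLev]

theorem bbLev_getElem? (c : PySem.Set Int) (T : List Int) : ∀ (k : Nat), k ≤ T.length →
    (bbLev c T)[k]? = some (bbAt c T k) := by
  induction T generalizing c with
  | nil =>
    intro k hk
    have : k = 0 := by simpa using hk
    subst this; rfl
  | cons s rest ih =>
    intro k hk
    cases k with
    | zero => rfl
    | succ k =>
      simp only [bbLev, bbAt, List.getElem?_cons_succ]
      exact ih (bbStep c s) k (by simpa using hk)

theorem bbLev_length (c : PySem.Set Int) (T : List Int) : (bbLev c T).length = T.length + 1 := by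
  induction T generalizing c with
  | nil => rfl
  | cons s rest ih => simp [bbLev, ih]

theorem mem_bbAt_succ (T : List Int) : ∀ (c : PySem.Set Int) (k : Nat) (hk : k < T.length) (x : Int),
    x ∈ bbAt c T k → x ∈ bbAt c T (k + 1) ∧ PySem.Int.mod x T[k] ∈ bbAt c T (k + 1) := by
  induction T with
  | nil => intro c k hk; simp at hk
  | cons s rest ih =>
    intro c k hk x hx
    cases k with
    | zero =>
      simpa [bbAt] using ⟨mem_bbStep_self c s x hx, mod_mem_bbStep c s x hx⟩
    | succ k =>
      simpa [bbAt] using ih (bbStep c s) k (by simpa using hk) x hx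

-- a comprehension dict: get? after folding inserts of 'g z' over a list
theorem dict_comp_get? (g : Int → Int) (l : List Int) : ∀ (d0 : PySem.Dict Int Int) (x : Int),
    (l.foldl (fun d z => d.insert z (g z)) d0).get? x
      = if x ∈ l then some (g x) else d0.get? x := by
  induction l with
  | nil => intro d0 x; simp
  | cons z rest ih =>
    intro d0 x
    simp only [List.foldl_cons, ih, PySem.Dict.get?_insert, List.mem_cons]
    by_cases hr : x ∈ rest <;> by_cases hz : x = z <;> simp [hr, hz]

-- ===== VERDICT helper: everything B's nested folds compute, against bbF =====

-- invariant of the backward loop: after having processed indices T.length-1 … j+1, the table is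
-- the bbF values of level j+1
def bbInv (MOD : Int) (T : List Int) (c : PySem.Set Int) (j : Int) (t : PySem.Dict Int Int) : Prop :=
  ∀ x, x ∈ bbAt c T (j + 1).toNat →
    t.get? x = some (bbF MOD (T.drop (j + 1).toNat) x)

theorem bbBack (MOD : Int) (S' : List Int) (N : Int) (c : PySem.Set Int) (T : List Int)
    (hTdef : T = S'.take N.toNat)
    (hN0 : 0 ≤ N) (hlen : N ≤ (S'.length : Int)) : ∀ (n : Nat) (a : Int)
    (t : PySem.Dict Int Int), a + 1 = n → a < N →
    bbInv MOD T c a t →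
    bbInv MOD T c (-1)
      ((PySem.List.pyRange a (-1) (-1)).foldl
        (fun t k =>
          (PySem.List.pyGetD (bbLev c T) k []).foldl
            (fun d x => d.insert x (PySem.Int.mod
                (t.getD (PySem.Int.mod x (PySem.List.pyGetD S' k 0)) 0
                 + t.getD x 0 * (N - k - 1)) MOD))
            PySem.Dict.empty) t) := by
  intro n
  induction n with
  | zero =>
    intro a t ha _ hinv
    have : a = -1 := by omega
    subst this
    rw [PySem.List.pyRange_neg_one_eq_nil (by omega)]
    exact hinv
  | succ n ih =>
    intro a t ha hlt hinv
    have hTlen : (T.length : Int) = N := by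
      rw [hTdef, List.length_take]; omega
    have ha0 : 0 ≤ a := by omega
    rw [PySem.List.pyRange_neg_one_cons (by omega)]
    simp only [List.foldl_cons]
    refine ih (a - 1) _ (by omega) (by omega) ?_
    -- show the new table satisfies the invariant one level down
    intro x hx
    have hsz : (a - 1 + 1).toNat = a.toNat := by omega
    rw [hsz] at hx
    have hkN : a.toNat < T.length := by omega
    -- the set the comprehension ranges over is level a
    have hlvl : PySem.List.pyGetD (bbLev c T) a [] = bbAt c T a.toNat := by
      rw [PySem.List.pyGetD_eq_getElem _ _ ha0 (by rw [bbLev_length]; push_cast; omega)]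
      have := bbLev_getElem? c T a.toNat (le_of_lt hkN)
      rwa [List.getElem?_eq_getElem (by rw [bbLev_length]; omega), Option.some_inj] at this
    -- S'[a] is T[a] (a < N ≤ len S')
    have haL : a.toNat < S'.length := by omega
    have hTk : PySem.List.pyGetD S' a 0 = T[a.toNat] := by
      rw [PySem.List.pyGetD_eq_getElem _ _ ha0 (by omega)]
      simp only [hTdef]
      exact (List.getElem_take (xs := S') (i := a.toNat)).symm
    rw [hlvl, dict_comp_get?, if_pos hx, hTk]
    -- both looked-up keys are in level a+1, where t is correct
    obtain ⟨hx1, hx2⟩ := mem_bbAt_succ T c a.toNat hkN x hx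
    have hsucc : (a + 1).toNat = a.toNat + 1 := by omega
    have hv2 := hinv x (by rw [hsucc]; exact hx1)
    have hv1 := hinv (PySem.Int.mod x T[a.toNat]) (by rw [hsucc]; exact hx2)
    rw [hsucc] at hv1 hv2
    simp only [PySem.Dict.getD, hv1, hv2, Option.getD_some]
    -- unfold one step of bbF on the dropped suffix
    have hdrop : T.drop a.toNat = T[a.toNat] :: T.drop (a.toNat + 1) :=
      List.drop_eq_getElem_cons hkN
    have hlen' : ((T.drop (a.toNat + 1)).length : Int) = N - a - 1 := by
      rw [List.length_drop]; omega
    rw [hsz, hdrop]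
    simp only [bbF, hlen']

theorem compute_blackboard_sum_spec : Claim_equal_compute_blackboard_sum := by
  intro N X S MOD _ hpre
  obtain ⟨hN0, hNlen, _, _⟩ := hpre
  unfold Spec_compute_blackboard_sum compute_blackboard_sum compute_blackboard_sum_alt
  dsimp only
  set S' := PySem.List.sorted S (fun x => x) true with hS'
  have hlenS' : N ≤ (S'.length : Int) := by rw [hS', PySem.List.length_sorted]; exact hNlen
  set T := S'.take N.toNat with hT
  set c : PySem.Set Int := PySem.Set.ofList [X] with hc
  have hTlen : (T.length : Int) = N := by
    rw [hT, List.length_take]; omega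
  -- A's side computes bbF MOD T X
  have hA : (bbDdp MOD T (List.replicate T.length PySem.Dict.empty) X).1 = bbF MOD T X :=
    (bbDdp_correct MOD T _ X (bbGood_replicate MOD T)).1
  rw [hA]
  -- B's forward loop builds bbLev c T
  have hloop : (PySem.List.pyRange 0 N 1).foldl
      (fun lv k => lv ++ [bbStep (PySem.List.pyGetD lv (-1) []) (PySem.List.pyGetD S' k 0)])
      [c] = bbLev c T := by
    have := bbFwd S' N N.toNat 0 [] c (by omega) (by omega) hlenS'
    simpa [hT] using this
  rw [hloop]
  -- the initial table is the identity on level N, i.e. bbInv at j = N - 1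
  have hlast : PySem.List.pyGetD (bbLev c T) N [] = bbAt c T T.length := by
    have hNT : N.toNat = T.length := by omega
    rw [PySem.List.pyGetD_eq_getElem _ _ hN0 (by rw [bbLev_length]; push_cast; omega)]
    have h2 := bbLev_getElem? c T N.toNat (by omega)
    rw [List.getElem?_eq_getElem (by rw [bbLev_length]; omega), Option.some_inj] at h2
    exact h2.trans (by rw [hNT])
  have hinv0 : bbInv MOD T c (N - 1)
      ((PySem.List.pyGetD (bbLev c T) N []).foldl
        (fun d x => d.insert x x) (PySem.Dict.empty : PySem.Dict Int Int)) := by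
    intro x hx
    have hL : (N - 1 + 1).toNat = T.length := by omega
    rw [hL] at hx
    rw [hlast, dict_comp_get? (fun x => x) _ _ x, if_pos hx, hL]
    simp [bbF]
  -- the backward loop lands on bbInv at j = -1, i.e. the bbF values of level 0
  have hfin := bbBack MOD S' N c T hT hN0 hlenS' N.toNat (N - 1) _ (by omega) (by omega) hinv0
  have hX : X ∈ bbAt c T ((-1 : Int) + 1).toNat := by
    simp only [hc]
    have : ((-1 : Int) + 1).toNat = 0 := by omega
    rw [this, bbAt]
    rw [PySem.Set.mem_ofList]; exact List.mem_singleton_self X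
  have := hfin X hX
  have h0 : ((-1 : Int) + 1).toNat = 0 := rfl
  rw [h0, List.drop_zero] at this
  simp only [PySem.Dict.getD] at this ⊢
  rw [this]
  rfl
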